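-- pv_equiv track=rewrite | github.com/Mohsin-Rajpoot/leetcode-problems | findPlayersWithLoss.py | find_players
-- ===== SOURCE A (Python) =====
-- def find_players(nums):
--     winners = {}
--     loosers = {}
--     win = []
--     loos = []
--     for i in nums:
--         if i[0] in winners:
--             winners[i[0]] += 1
--         else:
--             winners[i[0]] = 1
--         if i[1] in loosers:
--             loosers[i[1]] += 1
--         else:
--             loosers[i[1]] = 1
--     for i in winners:
--         if i not in loosers:
--             win.append(i)
--     for i in loosers:
--         if loosers[i] == 1:
--             loos.append(i)
--     win.sort()
--     loos.sort()
--     return [win, loos]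
-- ===== SOURCE B (Python) =====
-- def find_players(nums):
--     losses = sorted(l for _, l in nums)
--     dup = {a for a, b in zip(losses, losses[1:]) if a == b}
--     one_loss = [x for x in losses if x not in dup]
--     zero_loss = sorted({w for w, _ in nums} - set(losses))
--     return [zero_loss, one_loss]
-- ===== Notes on version B (the rewrite author's own statement) =====
-- stated objective: alternative
-- what changed: Replaces A's hash-counting (two count dicts plus key-scan loops) with sort-then-adjacent-scan: sort the losers once, detect players with repeated losses as adjacent equal pairs of the sorted list, take the remaining (already sorted) entries as the one-loss list, and get the zero-loss list by set difference; no per-player counters exist anywhere.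
import Mathlib
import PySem

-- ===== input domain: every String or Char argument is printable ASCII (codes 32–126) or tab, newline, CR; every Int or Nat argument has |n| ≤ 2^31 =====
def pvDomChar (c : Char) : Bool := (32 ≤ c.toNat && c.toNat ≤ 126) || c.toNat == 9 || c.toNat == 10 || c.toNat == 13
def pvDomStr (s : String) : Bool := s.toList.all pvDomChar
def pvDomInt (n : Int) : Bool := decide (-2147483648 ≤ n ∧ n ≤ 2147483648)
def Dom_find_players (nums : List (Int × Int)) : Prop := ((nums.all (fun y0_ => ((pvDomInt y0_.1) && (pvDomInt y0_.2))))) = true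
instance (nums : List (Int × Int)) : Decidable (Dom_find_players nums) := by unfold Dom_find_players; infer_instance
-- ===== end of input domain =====

-- B replaces A's hash-counting (two count dicts + key-scan loops) by sort-then-adjacent-scan:
-- sort the losers, find repeat losers as adjacent equal pairs, keep everything else of the
-- sorted list as the one-loss list, zero-loss by set difference; objective: alternative algorithm.

-- ===== PORT A =====
-- the update of the 'winners' dict in one iteration of A's 'for i in nums' loop
def fpW (d : PySem.Dict Int Int) (i : Int × Int) : PySem.Dict Int Int :=
  if d.contains i.1 then d.insert i.1 (d.getD i.1 0 + 1) else d.insert i.1 1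
-- the update of the 'loosers' dict in the same iteration
def fpL (d : PySem.Dict Int Int) (i : Int × Int) : PySem.Dict Int Int :=
  if d.contains i.2 then d.insert i.2 (d.getD i.2 0 + 1) else d.insert i.2 1

def find_players (nums : List (Int × Int)) : List (List Int) :=
  let st := nums.foldl (fun st i => (fpW st.1 i, fpL st.2 i)) (PySem.Dict.empty, PySem.Dict.empty)
  let win := st.1.keys.foldl
    (fun acc i => if !(st.2.contains i) then acc ++ [i] else acc) []
  let loos := st.2.keys.foldl
    (fun acc i => if st.2.getD i 0 == 1 then acc ++ [i] else acc) []
  [PySem.List.sorted win (fun x => x) false, PySem.List.sorted loos (fun x => x) false]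

-- ===== PORT B =====
def find_players_alt (nums : List (Int × Int)) : List (List Int) :=
  let losses := PySem.List.sorted (nums.map (·.2)) (fun x => x) false
  let dup : PySem.Set Int := PySem.Set.ofList
    (((losses.zip (PySem.List.slice losses (some 1))).filter (fun p => p.1 == p.2)).map (·.1))
  let one_loss := losses.filter (fun x => !(PySem.Set.contains dup x))
  let zero_loss := PySem.List.sorted
    (PySem.Set.diff (PySem.Set.ofList (nums.map (·.1))) (PySem.Set.ofList losses)) (fun x => x) false
  [zero_loss, one_loss]

-- ===== PRECONDITION & SPEC =====
def Spec_find_players (nums : List (Int × Int)) (out : List (List Int)) : Prop := out = find_players_alt nums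
instance (nums : List (Int × Int)) (out : List (List Int)) : Decidable (Spec_find_players nums out) := by unfold Spec_find_players; infer_instance

-- ===== CLAIM (what is proved, stated in full; the proofs are below) =====
def Claim_equal_find_players : Prop := ∀ (nums : List (Int × Int)), Dom_find_players nums → Spec_find_players nums (find_players nums)

-- ===== LEMMAS AND PROOFS =====

-- A's winners dict is Counter(first components)
lemma fpW_counter (nums : List (Int × Int)) :
    nums.foldl fpW PySem.Dict.empty = PySem.Dict.counter (nums.map (·.1)) := by
  rw [← PySem.Dict.foldl_insert_getD_add_one_eq_counter, List.foldl_map]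
  apply PySem.List.foldl_congr_mem
  intro d i _
  unfold fpW
  split_ifs with h
  · rfl
  · rw [PySem.Dict.getD_of_not_contains]
    · norm_num
    · simpa using h

-- A's loosers dict is Counter(second components)
lemma fpL_counter (nums : List (Int × Int)) :
    nums.foldl fpL PySem.Dict.empty = PySem.Dict.counter (nums.map (·.2)) := by
  rw [← PySem.Dict.foldl_insert_getD_add_one_eq_counter, List.foldl_map]
  apply PySem.List.foldl_congr_mem
  intro d i _
  unfold fpL
  split_ifs with h
  · rfl
  · rw [PySem.Dict.getD_of_not_contains]
    · norm_num
    · simpa using h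

-- elements of B's adjacent-equal-pair list are elements of the scanned list
lemma mem_of_mem_dupList (s : List Int) (x : Int)
    (h : x ∈ ((s.zip s.tail).filter (fun p => p.1 == p.2)).map (·.1)) : x ∈ s := by
  simp only [List.mem_map, List.mem_filter] at h
  obtain ⟨p, ⟨hz, _⟩, hx⟩ := h
  obtain ⟨h1, _⟩ := List.of_mem_zip hz
  simpa [hx] using h1

-- in a ≤-sorted list, adjacent equal pairs detect exactly the elements of multiplicity ≥ 2
lemma mem_dupList_iff (s : List Int) (hs : s.Pairwise (· ≤ ·)) (x : Int) :
    x ∈ ((s.zip s.tail).filter (fun p => p.1 == p.2)).map (·.1) ↔ 2 ≤ s.count x := by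
  induction s with
  | nil => simp
  | cons a t ih =>
    cases t with
    | nil =>
        by_cases hxa : a = x <;> simp [hxa]
    | cons b t' =>
        have hpt : (b :: t').Pairwise (· ≤ ·) := hs.of_cons
        have hab : a ≤ b := (List.pairwise_cons.mp hs).1 b (by simp)
        have ihh := ih hpt
        simp only [List.tail_cons] at ihh ⊢
        rw [List.zip_cons_cons, List.filter_cons]
        by_cases hab' : a = b
        · subst hab'
          simp only [BEq.rfl, if_pos, List.map_cons, List.mem_cons]
          constructor
          · intro h
            rcases h with h | h
            · subst h
              simp
            · have h2 := ihh.mp h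
              exact le_trans h2 (List.Sublist.count_le x (List.sublist_cons_self _ _))
          · intro h
            by_cases hxa : x = a
            · exact Or.inl hxa
            · refine Or.inr (ihh.mpr ?_)
              rwa [List.count_cons_of_ne (Ne.symm hxa)] at h
        · have hne : (a == b) = false := by simpa using hab'
          rw [hne]
          simp only [Bool.false_eq_true, reduceIte]
          by_cases hxa : x = a
          · subst hxa
            have hnot : x ∉ b :: t' := by
              intro hm
              rcases List.mem_cons.mp hm with h' | h'
              · exact hab' h'
              · have hbx : b ≤ x := (List.pairwise_cons.mp hpt).1 _ h'
                exact hab' (le_antisymm hab hbx)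
            constructor
            · intro h
              exact absurd (mem_of_mem_dupList (b :: t') x (by simpa using h)) hnot
            · intro h
              exfalso
              have hc0 : (b :: t').count x = 0 := List.count_eq_zero_of_not_mem hnot
              rw [List.count_cons_self, hc0] at h
              omega
          · rw [ihh, List.count_cons_of_ne (Ne.symm hxa)]

-- ===== VERDICT (by name: the statement is the Claim_ definition above) =====
theorem find_players_spec : Claim_equal_find_players := by
  intro nums _
  simp only [Spec_find_players, find_players, find_players_alt]
  rw [PySem.List.foldl_prod_mk (f := fpW) (g := fpL), fpW_counter, fpL_counter]
  dsimp only
  set fsts := nums.map (·.1) with hf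
  set snds := nums.map (·.2) with hsn
  set s := PySem.List.sorted snds (fun x => x) false with hss
  have hsp : s.Perm snds := PySem.List.sorted_perm snds (fun x => x) false
  have hspair : s.Pairwise (· ≤ ·) := by
    simpa using PySem.List.sorted_pairwise snds (fun x => x)
  have hslice : PySem.List.slice s (some 1) = s.tail := by
    rw [PySem.List.slice_from s (by norm_num)]
    simp [List.drop_one]
  rw [hslice]
  rw [PySem.List.foldl_append_if, PySem.List.foldl_append_if]
  simp only [List.map_id_fun', id, List.nil_append, PySem.Dict.keys_counter,
    PySem.Dict.contains_counter, PySem.Dict.getD_counter]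
  have hdupc : ∀ x : Int,
      (PySem.Set.ofList (((s.zip s.tail).filter (fun p => p.1 == p.2)).map (·.1))).contains x
        = true ↔ 2 ≤ s.count x := by
    intro x
    rw [PySem.Set.contains_iff, PySem.Set.mem_ofList, mem_dupList_iff s hspair]
  set q : Int → Bool := fun x =>
    !(PySem.Set.ofList (((s.zip s.tail).filter (fun p => p.1 == p.2)).map (·.1))).contains x
    with hq
  have hq1 : ∀ x : Int, q x = true ↔ ¬ 2 ≤ s.count x := by
    intro x
    cases hcb : (PySem.Set.ofList (((s.zip s.tail).filter (fun p => p.1 == p.2)).map (·.1))).contains x with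
    | false =>
        simp only [hq, hcb, Bool.not_false, true_iff]
        intro hc
        rw [(hdupc x).mpr hc] at hcb
        cases hcb
    | true =>
        simp only [hq, hcb, Bool.not_true]
        exact iff_of_false (by simp) (not_not_intro ((hdupc x).mp hcb))
  have hndys : (s.filter q).Nodup := by
    rw [List.nodup_iff_count_le_one]
    intro a
    by_cases ha : q a = true
    · rw [List.count_filter ha]
      have := (hq1 a).mp ha
      omega
    · rw [List.count_eq_zero_of_not_mem (fun hm => ha (List.mem_filter.mp hm).2)]
      omega
  have hmem : ∀ x, x ∈ s.filter q ↔ x ∈ snds ∧ snds.count x = 1 := by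
    intro x
    rw [List.mem_filter]
    constructor
    · rintro ⟨hx, hqx⟩
      have h2 := (hq1 x).mp hqx
      have h1 : 1 ≤ s.count x := List.one_le_count_iff.mpr hx
      refine ⟨hsp.mem_iff.mp hx, ?_⟩
      rw [← hsp.count_eq x]
      omega
    · rintro ⟨hx, hc⟩
      refine ⟨hsp.mem_iff.mpr hx, (hq1 x).mpr ?_⟩
      rw [hsp.count_eq x, hc]
      omega
  congr 1
  · -- zero-loss lists
    apply PySem.List.sorted_eq_sorted_of_perm _ _ (fun x => x) (fun a b h => h)
    apply (List.perm_ext_iff_of_nodup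
      ((PySem.Set.nodup_ofList fsts).filter _)
      (PySem.Set.nodup_diff _ _ (PySem.Set.nodup_ofList fsts))).mpr
    intro x
    simp only [List.mem_filter, PySem.Set.mem_ofList, PySem.Set.mem_diff,
      Bool.not_eq_eq_eq_not, Bool.not_true, List.contains_eq_mem, decide_eq_false_iff_not,
      hsp.mem_iff]
  · congr 1
    -- one-loss lists
    apply PySem.List.sorted_eq_of_perm_of_pairwise_lt
    · -- the filtered sorted list is a permutation of A's candidate list
      apply (List.perm_ext_iff_of_nodup hndys
        (List.Nodup.filter _ (PySem.Set.nodup_ofList snds))).mpr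
      intro x
      rw [hmem x, List.mem_filter, PySem.Set.mem_ofList]
      constructor
      · rintro ⟨hx, hc⟩
        refine ⟨hx, ?_⟩
        rw [hc]
        decide
      · rintro ⟨hx, hc⟩
        refine ⟨hx, ?_⟩
        have : ((snds.count x : Int)) = 1 := beq_iff_eq.mp hc
        exact_mod_cast this
    · -- that list is strictly increasing
      have hle : (s.filter q).Pairwise (· ≤ ·) :=
        List.Pairwise.sublist (List.filter_sublist) hspair
      exact (hle.and hndys).imp (fun h => lt_of_le_of_ne h.1 h.2)
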